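-- pv_equiv track=rewrite | github.com/AnshD2002/Python_Tutorial | 2026/February/07_February_Max_sum_in_the_configuration.py | maxSum_1
-- ===== SOURCE A (Python) =====
-- def maxSum_1(arr):
--     # Code here
--     sum_arr = []
--     l = len(arr)
--     for i in range(len(arr)):
--         sum = 0
--         arr.append(arr[i])
--         narr = arr[i:(i+l)]
--         for i in range(len(narr)):
--             sum = sum+ (i*narr[i])
--         sum_arr.append(sum)
--     sum_arr.sort(reverse=True)
--     return sum_arr[0]
-- ===== SOURCE B (Python) =====
-- def maxSum_1(arr):
--     n = len(arr)
--     total = sum(arr)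
--     cur = sum(i * x for i, x in enumerate(arr))
--     best = cur
--     for k in range(n - 1):
--         cur += n * arr[k] - total
--         if cur > best:
--             best = cur
--     return best
-- ===== Notes on version B (the rewrite author's own statement) =====
-- stated objective: faster
-- what changed: B replaces A's O(n^2) build-every-rotation-and-resum (plus a full sort just to take the maximum) with the O(n) incremental identity next = cur + n*arr[k] - total and a running max; B also does not mutate arr, while A appends n elements to it (return value is what is proved equal).
import Mathlib
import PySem

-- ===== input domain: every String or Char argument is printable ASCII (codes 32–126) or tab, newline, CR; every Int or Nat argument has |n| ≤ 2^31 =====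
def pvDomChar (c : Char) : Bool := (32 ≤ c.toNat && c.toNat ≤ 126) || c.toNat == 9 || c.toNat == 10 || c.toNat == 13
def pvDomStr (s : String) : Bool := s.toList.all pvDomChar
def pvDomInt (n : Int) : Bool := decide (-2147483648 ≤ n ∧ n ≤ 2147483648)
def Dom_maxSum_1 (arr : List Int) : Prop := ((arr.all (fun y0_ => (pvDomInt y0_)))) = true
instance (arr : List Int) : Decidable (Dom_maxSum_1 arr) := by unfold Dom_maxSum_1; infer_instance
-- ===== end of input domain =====

-- B computes the same maximum-over-rotations value with the O(n) incremental formula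
-- instead of A's rebuild-every-rotation-and-sort; the equality proved is about the
-- RETURN value only: A appends n elements to its argument list, B does not mutate it.


-- ===== PORT A =====
def maxSum_1 (arr : List Int) : Int :=
  let l : Int := arr.length
  let st := (PySem.List.pyRange 0 (arr.length : Int) 1).foldl
    (fun (st : List Int × List Int) i =>
      let a := st.1 ++ [PySem.List.pyGetD st.1 i 0]
      let narr := PySem.List.slice a (some i) (some (i + l))
      let sum := (PySem.List.pyRange 0 (narr.length : Int) 1).foldl
        (fun s j => s + j * PySem.List.pyGetD narr j 0) 0
      (a, st.2 ++ [sum]))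
    (arr, ([] : List Int))
  let sum_arr := PySem.List.sorted st.2 (fun x => x) true
  PySem.List.pyGetD sum_arr 0 0   -- sum_arr[0]; IndexError on [] is excluded by Pre_

-- ===== PORT B =====
def maxSum_1_alt (arr : List Int) : Int :=
  let n : Int := arr.length
  let total : Int := arr.sum
  let cur : Int := ((PySem.List.enumerate arr 0).map (fun p => p.1 * p.2)).sum
  let st := (PySem.List.pyRange 0 (n - 1) 1).foldl
    (fun (st : Int × Int) k =>
      let cur := st.1 + (n * PySem.List.pyGetD arr k 0 - total)
      let best := if cur > st.2 then cur else st.2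
      (cur, best))
    (cur, cur)
  st.2

-- ===== PRECONDITION & SPEC =====
-- Pre_ excludes only the empty list, on which A raises IndexError (sum_arr[0] on the empty sum list).
def Pre_maxSum_1 (arr : List Int) : Prop := arr ≠ []
instance (arr : List Int) : Decidable (Pre_maxSum_1 arr) := by unfold Pre_maxSum_1; infer_instance
def pvWitness_maxSum_1 : List Int := [3, -1, 2]

def Spec_maxSum_1 (arr : List Int) (out : Int) : Prop := out = maxSum_1_alt arr
instance (arr : List Int) (out : Int) : Decidable (Spec_maxSum_1 arr out) := by unfold Spec_maxSum_1; infer_instance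

-- ===== CLAIM (what is proved, stated in full; the proofs are below) =====
def Claim_equal_maxSum_1 : Prop := ∀ (arr : List Int), Dom_maxSum_1 arr → Pre_maxSum_1 arr → Spec_maxSum_1 arr (maxSum_1 arr)

-- ===== LEMMAS AND PROOFS =====

/-- weighted sum: wsum ofs r = Σ_j (ofs+j)·r[j] -/
def wsum : Int → List Int → Int
  | _, [] => 0
  | ofs, x :: t => ofs * x + wsum (ofs + 1) t
def rotl (arr : List Int) (k : Nat) : List Int := arr.drop k ++ arr.take k
theorem wsum_append (a b : List Int) : ∀ ofs, wsum ofs (a ++ b) = wsum ofs a + wsum (ofs + a.length) b := by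
  induction a with
  | nil => intro ofs; simp [wsum]
  | cons x t ih =>
      intro ofs
      simp only [List.cons_append, wsum, ih (ofs + 1), List.length_cons]
      push_cast
      have h : ofs + 1 + (t.length : Int) = ofs + ((t.length : Int) + 1) := by ring
      rw [h]; ring
theorem wsum_succ (t : List Int) : ∀ ofs, wsum (ofs + 1) t = wsum ofs t + t.sum := by
  induction t with
  | nil => intro ofs; simp [wsum]
  | cons x t ih => intro ofs; simp only [wsum, List.sum_cons, ih]; ring
theorem wsum_rot_step (x : Int) (t : List Int) :
    wsum 0 (t ++ [x]) = wsum 0 (x :: t) - (x :: t).sum + ((x :: t).length : Int) * x := by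
  have h1 : wsum 0 (t ++ [x]) = wsum 0 t + (t.length : Int) * x := by
    have := wsum_append t [x] 0
    simp only [wsum] at this
    rw [this]; ring
  have h2 : wsum 1 t = wsum 0 t + t.sum := by
    have := wsum_succ t 0
    rw [show (0 : Int) + 1 = 1 from by ring] at this
    exact this
  simp only [wsum, List.sum_cons, List.length_cons, show (0 : Int) + 1 = 1 from by ring]
  rw [h1, h2]
  push_cast
  ring
theorem sum_rotl (arr : List Int) (k : Nat) : (rotl arr k).sum = arr.sum := by
  simp [rotl]; rw [add_comm, ← List.sum_append, List.take_append_drop]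
theorem length_rotl (arr : List Int) (k : Nat) : (rotl arr k).length = arr.length := by
  simp [rotl]; omega

theorem rotl_cons (arr : List Int) (k : Nat) (hk : k < arr.length) :
    rotl arr k = arr[k] :: (arr.drop (k + 1) ++ arr.take k) := by
  unfold rotl
  rw [show arr.drop k = arr[k] :: arr.drop (k + 1) from (List.getElem_cons_drop hk).symm,
      List.cons_append]
theorem rotl_succ_eq (arr : List Int) (k : Nat) (hk : k < arr.length) :
    rotl arr (k + 1) = (arr.drop (k + 1) ++ arr.take k) ++ [arr[k]] := by
  unfold rotl
  rw [List.take_add_one, List.getElem?_eq_getElem hk]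
  simp
theorem wsum_rotl_succ (arr : List Int) (k : Nat) (hk : k < arr.length) :
    wsum 0 (rotl arr (k + 1)) = wsum 0 (rotl arr k) + (arr.length : Int) * arr.getD k 0 - arr.sum := by
  have hstep := wsum_rot_step arr[k] (arr.drop (k + 1) ++ arr.take k)
  rw [← rotl_cons arr k hk] at hstep
  rw [rotl_succ_eq arr k hk, hstep, sum_rotl, length_rotl]
  rw [List.getD_eq_getElem _ _ hk]
  ring
theorem rotl_zero (arr : List Int) : rotl arr 0 = arr := by simp [rotl]

theorem inner_eq_wsum (r : List Int) :
    (PySem.List.pyRange 0 (r.length : Int) 1).foldl (fun s j => s + j * PySem.List.pyGetD r j 0) 0 = wsum 0 r := by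
  induction r using List.reverseRecOn with
  | nil => simp [PySem.List.pyRange_one_eq_nil, wsum]
  | append_singleton r' x ih =>
      have hlen : ((r' ++ [x]).length : Int) = (r'.length : Int) + 1 := by simp
      rw [hlen, PySem.List.pyRange_one_succ_right (by positivity), List.foldl_append]
      have hcongr : (PySem.List.pyRange 0 (r'.length : Int) 1).foldl
          (fun s j => s + j * PySem.List.pyGetD (r' ++ [x]) j 0) 0
          = (PySem.List.pyRange 0 (r'.length : Int) 1).foldl
          (fun s j => s + j * PySem.List.pyGetD r' j 0) 0 := by
        apply PySem.List.foldl_congr_mem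
        intro acc j hj
        rw [PySem.List.mem_pyRange_one] at hj
        rw [PySem.List.pyGetD_eq_getElem _ _ hj.1 (by simp; omega),
            PySem.List.pyGetD_eq_getElem _ _ hj.1 (by omega)]
        rw [List.getElem_append_left (by omega)]
      rw [hcongr, ih]
      have hx : PySem.List.pyGetD (r' ++ [x]) (r'.length : Int) 0 = x := by
        rw [PySem.List.pyGetD_natCast]
        rw [List.getD_eq_getElem _ _ (by simp)]
        rw [List.getElem_append_right (by omega)]
        simp only [Nat.sub_self, List.getElem_cons_zero]
      simp only [List.foldl_cons, List.foldl_nil, hx]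
      rw [wsum_append r' [x] 0]
      simp [wsum]

theorem outerA (arr : List Int) : ∀ m, m ≤ arr.length →
    (PySem.List.pyRange 0 (m : Int) 1).foldl
      (fun (st : List Int × List Int) i =>
        let a := st.1 ++ [PySem.List.pyGetD st.1 i 0]
        let narr := PySem.List.slice a (some i) (some (i + (arr.length : Int)))
        let sum := (PySem.List.pyRange 0 (narr.length : Int) 1).foldl
          (fun s j => s + j * PySem.List.pyGetD narr j 0) 0
        (a, st.2 ++ [sum]))
      (arr, [])
    = (arr ++ arr.take m, (List.range m).map (fun k => wsum 0 (rotl arr k))) := by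
  intro m
  induction m with
  | zero => intro _; simp [PySem.List.pyRange_one_eq_nil]
  | succ m ih =>
      intro hm
      have hm' : m < arr.length := by omega
      have hcast : ((m + 1 : Nat) : Int) = (m : Int) + 1 := by push_cast; ring
      rw [hcast, PySem.List.pyRange_one_succ_right (by positivity), List.foldl_append,
          ih (by omega)]
      simp only [List.foldl_cons, List.foldl_nil]
      have h1 : PySem.List.pyGetD (arr ++ arr.take m) (m : Int) 0 = arr[m] := by
        rw [PySem.List.pyGetD_natCast, List.getD_eq_getElem _ _ (by simp; omega),
            List.getElem_append_left (by omega)]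
      have h2 : (arr ++ arr.take m) ++ [arr[m]] = arr ++ arr.take (m + 1) := by
        rw [List.append_assoc, List.take_add_one, List.getElem?_eq_getElem hm']
        simp
      have h3 : PySem.List.slice (arr ++ arr.take (m + 1)) (some (m : Int))
          (some ((m : Int) + (arr.length : Int))) = rotl arr m := by
        rw [PySem.List.slice_natCast_add]
        rw [List.drop_append_of_le_length (by omega)]
        rw [List.take_append]
        rw [List.take_of_length_le (by simp)]
        have : arr.length - (arr.drop m).length = m := by simp; omega
        rw [this, List.take_take]
        have : min m (m + 1) = m := by omega
        rw [this]
        rfl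
      simp only [h1, h2, h3, inner_eq_wsum, List.range_succ, List.map_append, List.map_cons,
        List.map_nil]
theorem maxeq (b c : Int) : (if c > b then c else b) = max b c := by
  by_cases h : c > b <;> simp [h, max_def] <;> omega

theorem outerB (arr : List Int) : ∀ m, m ≤ arr.length - 1 →
    (PySem.List.pyRange 0 (m : Int) 1).foldl
      (fun (st : Int × Int) k =>
        let cur := st.1 + ((arr.length : Int) * PySem.List.pyGetD arr k 0 - arr.sum)
        let best := if cur > st.2 then cur else st.2
        (cur, best))
      (wsum 0 arr, wsum 0 arr)
    = (wsum 0 (rotl arr m),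
       ((List.range m).map (fun k => wsum 0 (rotl arr (k + 1)))).foldl max (wsum 0 arr)) := by
  intro m
  induction m with
  | zero => intro _; simp [PySem.List.pyRange_one_eq_nil, rotl_zero]
  | succ m ih =>
      intro hm
      have hm' : m < arr.length := by omega
      have hcast : ((m + 1 : Nat) : Int) = (m : Int) + 1 := by push_cast; ring
      rw [hcast, PySem.List.pyRange_one_succ_right (by positivity), List.foldl_append,
          ih (by omega)]
      simp only [List.foldl_cons, List.foldl_nil]
      have h1 : wsum 0 (rotl arr m) + ((arr.length : Int) * PySem.List.pyGetD arr (m : Int) 0 - arr.sum)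
          = wsum 0 (rotl arr (m + 1)) := by
        rw [PySem.List.pyGetD_natCast, wsum_rotl_succ arr m hm']
        ring
      simp only [h1, maxeq, List.range_succ, List.map_append, List.map_cons, List.map_nil,
        List.foldl_append, List.foldl_cons, List.foldl_nil]

theorem enum_wsum (t : List Int) : ∀ s : Int,
    ((PySem.List.enumerate t s).map (fun p => p.1 * p.2)).sum = wsum s t := by
  induction t with
  | nil => intro s; simp [PySem.List.enumerate_nil, wsum]
  | cons x t ih => intro s; rw [PySem.List.enumerate_cons]; simp [wsum, ih]

-- ===== VERDICT (by name: the statement is the Claim_ definition above) =====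
theorem maxSum_1_spec : Claim_equal_maxSum_1 := by
  intro arr _ hpre
  unfold Spec_maxSum_1
  have hlen : 1 ≤ arr.length := by
    cases arr with
    | nil => exact absurd rfl hpre
    | cons x t => simp
  have hA : maxSum_1 arr = PySem.List.pyGetD
      (PySem.List.sorted ((List.range arr.length).map (fun k => wsum 0 (rotl arr k)))
        (fun x => x) true) 0 0 := by
    simp only [maxSum_1]
    rw [outerA arr arr.length le_rfl]
  have hB : maxSum_1_alt arr
      = ((List.range (arr.length - 1)).map (fun k => wsum 0 (rotl arr (k + 1)))).foldl max
          (wsum 0 arr) := by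
    simp only [maxSum_1_alt]
    rw [enum_wsum arr 0]
    have hc : (arr.length : Int) - 1 = ((arr.length - 1 : Nat) : Int) := by omega
    rw [hc, outerB arr (arr.length - 1) le_rfl]
  rw [hA, hB]
  have hsplit : (List.range arr.length).map (fun k => wsum 0 (rotl arr k))
      = wsum 0 arr :: (List.range (arr.length - 1)).map (fun k => wsum 0 (rotl arr (k + 1))) := by
    obtain ⟨n, hn⟩ : ∃ n, arr.length = n + 1 := ⟨arr.length - 1, by omega⟩
    rw [hn, show n + 1 - 1 = n from by omega, List.range_succ_eq_map, List.map_cons, List.map_map]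
    simp [rotl_zero, Function.comp]
  have hMmem : ((List.range (arr.length - 1)).map (fun k => wsum 0 (rotl arr (k + 1)))).foldl max
      (wsum 0 arr) ∈ (List.range arr.length).map (fun k => wsum 0 (rotl arr k)) := by
    rw [hsplit]
    rcases PySem.List.foldl_max_mem
        ((List.range (arr.length - 1)).map (fun k => wsum 0 (rotl arr (k + 1)))) (wsum 0 arr)
      with h | h
    · rw [h]; exact List.mem_cons_self ..
    · exact List.mem_cons_of_mem _ h
  have hMub : ∀ y ∈ (List.range arr.length).map (fun k => wsum 0 (rotl arr k)),
      y ≤ ((List.range (arr.length - 1)).map (fun k => wsum 0 (rotl arr (k + 1)))).foldl max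
        (wsum 0 arr) := by
    rw [hsplit]
    intro y hy
    rcases List.mem_cons.mp hy with h | h
    · rw [h]
      exact (PySem.List.le_foldl_max _ _).1
    · exact (PySem.List.le_foldl_max _ _).2 y h
  obtain ⟨mx, t, hs⟩ : ∃ mx t, PySem.List.sorted
      ((List.range arr.length).map (fun k => wsum 0 (rotl arr k))) (fun x => x) true
      = mx :: t := by
    cases hsort : PySem.List.sorted
        ((List.range arr.length).map (fun k => wsum 0 (rotl arr k))) (fun x => x) true with
    | nil =>
        exfalso
        have := (PySem.List.sorted_eq_nil_iff _ _ _).mp hsort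
        have h0 : arr.length = 0 := by simpa using congrArg List.length this
        omega
    | cons a b => exact ⟨a, b, rfl⟩
  rw [hs, PySem.List.pyGetD_zero_cons]
  have hmx_mem : mx ∈ (List.range arr.length).map (fun k => wsum 0 (rotl arr k)) := by
    have hp := PySem.List.sorted_perm
      ((List.range arr.length).map (fun k => wsum 0 (rotl arr k))) (fun x => x) true
    rw [hs] at hp
    exact hp.subset (List.mem_cons_self ..)
  have hge := PySem.List.key_head_sorted_rev_ge
    ((List.range arr.length).map (fun k => wsum 0 (rotl arr k))) (fun x => x) hs
  exact le_antisymm (hMub mx hmx_mem) (hge _ hMmem)
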